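-- pv_equiv track=rewrite | github.com/hemoespoir-io/backend | servicesB/Analyse_de_donnes/testt.py | pasParJours
-- ===== SOURCE A (Python) =====
-- def pasParJours(age, weight):
--     dict = {}
--     JoursPatient = []
--     JoursPasPatient = []
--
--     if int(weight) < 20 or int(weight) >= 100:
--         JoursPatient = ["Anomalie : veuillez consulter un médecin le plus tôt possible"]
--         JoursPasPatient = [0]
--     else:
--         if 3 < int(age) <= 5:
--             jours = ["Lundi", "Mardi", "Mercredi", "Jeudi", "Vendredi", "Samedi", "Dimanche"]
--             pas_jour = [50, 40, 30, 40, 20, 10, 30]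
--             JoursPatient = jours
--             JoursPasPatient = pas_jour
--         elif 6 <= int(age) <= 10:
--             jours = ["Lundi", "Mardi", "Mercredi", "Jeudi", "Vendredi", "Samedi", "Dimanche"]
--             pas_jour = [10000, 11000, 14000, 9000, 10000, 13000, 11000]
--             JoursPatient = jours
--             JoursPasPatient = pas_jour
--         elif 10 < int(age) <= 20:
--             jours = ["Lundi", "Mardi", "Mercredi", "Jeudi", "Vendredi", "Samedi", "Dimanche"]
--             pas_jour = [10000, 11000, 11500, 12000, 11000, 12000, 13000]
--             JoursPatient = jours
--             JoursPasPatient = pas_jour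
--         elif 20 < int(age) <= 60:
--             jours = ["Lundi", "Mardi", "Mercredi", "Jeudi", "Vendredi", "Samedi", "Dimanche"]
--             pas_jour = [7000, 9000, 10000, 8500, 7500, 9500, 10000]
--             JoursPatient = jours
--             JoursPasPatient = pas_jour
--         elif 60 < int(age) <= 70:
--             jours = ["Lundi", "Mardi", "Mercredi", "Jeudi", "Vendredi", "Samedi", "Dimanche"]
--             pas_jour = [8000, 7500, 6500, 6000, 7900, 6800, 8200]
--             JoursPatient = jours
--             JoursPasPatient = pas_jour
--         elif 70 < int(age) <= 80:
--             jours = ["Lundi", "Mardi", "Mercredi", "Jeudi", "Vendredi", "Samedi", "Dimanche"]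
--             pas_jour = [3000, 3000, 3000, 3000, 3000, 3000, 3000]
--             JoursPatient = jours
--             JoursPasPatient = pas_jour
--         elif 80 < int(age) <= 100:
--             jours = ["Lundi", "Mardi", "Mercredi", "Jeudi", "Vendredi", "Samedi", "Dimanche"]
--             pas_jour = [100, 80, 60, 70, 20, 60, 40]
--             JoursPatient = jours
--             JoursPasPatient = pas_jour
--
--         if int(weight) > 90 and int(weight) < 100:
--             JoursPasPatient = [int(steps * 0.5) for steps in JoursPasPatient]
--
--     for i, j in zip(JoursPatient, JoursPasPatient):
--         dict[i] = j
--     return dict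
-- ===== SOURCE B (Python) =====
-- # Column-major layout: one step list PER DAY, indexed by the rank of the age
-- # among the bracket upper bounds (no interval search, no branch chain).
-- BOUNDS = [5, 10, 20, 60, 70, 80, 100]
-- STEPS_BY_DAY = {
--     "Lundi":    [50, 10000, 10000, 7000, 8000, 3000, 100],
--     "Mardi":    [40, 11000, 11000, 9000, 7500, 3000, 80],
--     "Mercredi": [30, 14000, 11500, 10000, 6500, 3000, 60],
--     "Jeudi":    [40, 9000, 12000, 8500, 6000, 3000, 70],
--     "Vendredi": [20, 10000, 11000, 7500, 7900, 3000, 20],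
--     "Samedi":   [10, 13000, 12000, 9500, 6800, 3000, 60],
--     "Dimanche": [30, 11000, 13000, 10000, 8200, 3000, 40],
-- }
--
-- def pasParJours(age, weight):
--     w = int(weight)
--     if w < 20 or w >= 100:
--         return {"Anomalie : veuillez consulter un médecin le plus tôt possible": 0}
--     a = int(age)
--     if a <= 3 or a > 100:
--         return {}
--     k = sum(b < a for b in BOUNDS)  # rank of the age among bracket upper bounds
--     halve = w > 90
--     return {day: (col[k] // 2 if halve else col[k]) for day, col in STEPS_BY_DAY.items()}
-- ===== Notes on version B (the rewrite author's own statement) =====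
-- stated objective: alternative
-- what changed: Transposes the data: instead of seven if/elif branches each selecting a row of per-day steps and a dict-building loop, B keeps one column (step list) per day and indexes each column by the RANK of the age among the bracket upper bounds (sum(b < a for b in BOUNDS)), which is correct because the integer age brackets are contiguous; the float halving int(steps*0.5) becomes steps//2, exact on these even non-negative values.
import Mathlib
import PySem

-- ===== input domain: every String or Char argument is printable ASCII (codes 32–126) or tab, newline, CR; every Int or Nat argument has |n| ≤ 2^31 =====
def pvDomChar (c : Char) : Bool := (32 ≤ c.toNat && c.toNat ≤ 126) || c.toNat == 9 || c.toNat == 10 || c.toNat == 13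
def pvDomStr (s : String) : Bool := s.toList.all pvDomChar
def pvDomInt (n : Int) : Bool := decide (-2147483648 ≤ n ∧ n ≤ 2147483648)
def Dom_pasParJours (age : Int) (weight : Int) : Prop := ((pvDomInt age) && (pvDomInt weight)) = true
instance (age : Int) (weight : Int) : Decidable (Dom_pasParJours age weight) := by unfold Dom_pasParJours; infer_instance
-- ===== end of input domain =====

-- B transposes A's row-per-bracket branch chain into one step column per day
-- indexed by the age's rank among the bracket upper bounds (objective: alternative).


-- ===== PORT A =====
-- int(steps * 0.5) is ported as floordiv steps 2: every step value A halves is an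
-- even non-negative integer ≤ 14000, for which steps*0.5 is exact in float and
-- truncation toward zero equals floor division by 2.
def pasParJours (age : Int) (weight : Int) : List (String × Int) :=
  let jours : List String := ["Lundi", "Mardi", "Mercredi", "Jeudi", "Vendredi", "Samedi", "Dimanche"]
  let jp : List String × List Int :=
    if weight < 20 ∨ 100 ≤ weight then
      (["Anomalie : veuillez consulter un médecin le plus tôt possible"], [0])
    else
      let base : List String × List Int :=
        if 3 < age ∧ age ≤ 5 then (jours, [50, 40, 30, 40, 20, 10, 30])
        else if 6 ≤ age ∧ age ≤ 10 then (jours, [10000, 11000, 14000, 9000, 10000, 13000, 11000])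
        else if 10 < age ∧ age ≤ 20 then (jours, [10000, 11000, 11500, 12000, 11000, 12000, 13000])
        else if 20 < age ∧ age ≤ 60 then (jours, [7000, 9000, 10000, 8500, 7500, 9500, 10000])
        else if 60 < age ∧ age ≤ 70 then (jours, [8000, 7500, 6500, 6000, 7900, 6800, 8200])
        else if 70 < age ∧ age ≤ 80 then (jours, [3000, 3000, 3000, 3000, 3000, 3000, 3000])
        else if 80 < age ∧ age ≤ 100 then (jours, [100, 80, 60, 70, 20, 60, 40])
        else ([], [])
      if 90 < weight ∧ weight < 100 then
        (base.1, base.2.map (fun steps => PySem.Int.floordiv steps 2))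
      else base
  ((List.zip jp.1 jp.2).foldl (fun d p => PySem.Dict.insert d p.1 p.2) PySem.Dict.empty).items

-- ===== PORT B =====
def pvBounds : List Int := [5, 10, 20, 60, 70, 80, 100]
def pvCols : List (String × List Int) :=
  [ ("Lundi",    [50, 10000, 10000, 7000, 8000, 3000, 100]),
    ("Mardi",    [40, 11000, 11000, 9000, 7500, 3000, 80]),
    ("Mercredi", [30, 14000, 11500, 10000, 6500, 3000, 60]),
    ("Jeudi",    [40, 9000, 12000, 8500, 6000, 3000, 70]),
    ("Vendredi", [20, 10000, 11000, 7500, 7900, 3000, 20]),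
    ("Samedi",   [10, 13000, 12000, 9500, 6800, 3000, 60]),
    ("Dimanche", [30, 11000, 13000, 10000, 8200, 3000, 40]) ]

def pasParJours_alt (age : Int) (weight : Int) : List (String × Int) :=
  if weight < 20 ∨ 100 ≤ weight then
    [("Anomalie : veuillez consulter un médecin le plus tôt possible", 0)]
  else if age ≤ 3 ∨ 100 < age then []
  else
    let k : Nat := pvBounds.countP (fun b => decide (b < age))
    pvCols.map (fun dc =>
      (dc.1, if 90 < weight then PySem.Int.floordiv (dc.2.getD k 0) 2 else dc.2.getD k 0))

-- ===== PRECONDITION & SPEC =====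
def Spec_pasParJours (age : Int) (weight : Int) (out : List (String × Int)) : Prop := out = pasParJours_alt age weight
instance (age : Int) (weight : Int) (out : List (String × Int)) : Decidable (Spec_pasParJours age weight out) := by unfold Spec_pasParJours; infer_instance

-- ===== CLAIM =====
def Claim_equal_pasParJours : Prop := ∀ (age : Int) (weight : Int), Dom_pasParJours age weight → Spec_pasParJours age weight (pasParJours age weight)

-- ===== LEMMAS AND PROOFS =====

-- ===== VERDICT =====
theorem pasParJours_spec : Claim_equal_pasParJours := by
  intro age weight _
  unfold Spec_pasParJours pasParJours pasParJours_alt pvBounds pvCols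
  by_cases hw : weight < 20 ∨ 100 ≤ weight
  · simp only [if_pos hw]; rfl
  · simp only [if_neg hw]
    by_cases hout : age ≤ 3 ∨ 100 < age
    · simp only [if_pos hout]
      have h1 : ¬(3 < age ∧ age ≤ 5) := by omega
      have h2 : ¬(6 ≤ age ∧ age ≤ 10) := by omega
      have h3 : ¬(10 < age ∧ age ≤ 20) := by omega
      have h4 : ¬(20 < age ∧ age ≤ 60) := by omega
      have h5 : ¬(60 < age ∧ age ≤ 70) := by omega
      have h6 : ¬(70 < age ∧ age ≤ 80) := by omega
      have h7 : ¬(80 < age ∧ age ≤ 100) := by omega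
      simp only [if_neg h1, if_neg h2, if_neg h3, if_neg h4, if_neg h5, if_neg h6, if_neg h7]
      split_ifs <;> first | omega | decide
    · simp only [if_neg hout]
      by_cases h1 : 3 < age ∧ age ≤ 5
      · simp only [if_pos h1, List.countP,
          List.countP.go, decide_eq_false (show ¬(5:Int) < age by omega),
          decide_eq_false (show ¬(10:Int) < age by omega), decide_eq_false (show ¬(20:Int) < age by omega),
          decide_eq_false (show ¬(60:Int) < age by omega), decide_eq_false (show ¬(70:Int) < age by omega),
          decide_eq_false (show ¬(80:Int) < age by omega), decide_eq_false (show ¬(100:Int) < age by omega)]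
        split_ifs <;> first | omega | decide
      · simp only [if_neg h1]
        by_cases h2 : 6 ≤ age ∧ age ≤ 10
        · simp only [if_pos h2, List.countP, List.countP.go,
            decide_eq_true (show (5:Int) < age by omega),
            decide_eq_false (show ¬(10:Int) < age by omega), decide_eq_false (show ¬(20:Int) < age by omega),
            decide_eq_false (show ¬(60:Int) < age by omega), decide_eq_false (show ¬(70:Int) < age by omega),
            decide_eq_false (show ¬(80:Int) < age by omega), decide_eq_false (show ¬(100:Int) < age by omega)]
          split_ifs <;> first | omega | decide
        · simp only [if_neg h2]
          by_cases h3 : 10 < age ∧ age ≤ 20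
          · simp only [if_pos h3, List.countP, List.countP.go,
              decide_eq_true (show (5:Int) < age by omega), decide_eq_true (show (10:Int) < age by omega),
              decide_eq_false (show ¬(20:Int) < age by omega),
              decide_eq_false (show ¬(60:Int) < age by omega), decide_eq_false (show ¬(70:Int) < age by omega),
              decide_eq_false (show ¬(80:Int) < age by omega), decide_eq_false (show ¬(100:Int) < age by omega)]
            split_ifs <;> first | omega | decide
          · simp only [if_neg h3]
            by_cases h4 : 20 < age ∧ age ≤ 60
            · simp only [if_pos h4, List.countP, List.countP.go,
                decide_eq_true (show (5:Int) < age by omega), decide_eq_true (show (10:Int) < age by omega),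
                decide_eq_true (show (20:Int) < age by omega),
                decide_eq_false (show ¬(60:Int) < age by omega), decide_eq_false (show ¬(70:Int) < age by omega),
                decide_eq_false (show ¬(80:Int) < age by omega), decide_eq_false (show ¬(100:Int) < age by omega)]
              split_ifs <;> first | omega | decide
            · simp only [if_neg h4]
              by_cases h5 : 60 < age ∧ age ≤ 70
              · simp only [if_pos h5, List.countP, List.countP.go,
                  decide_eq_true (show (5:Int) < age by omega), decide_eq_true (show (10:Int) < age by omega),
                  decide_eq_true (show (20:Int) < age by omega), decide_eq_true (show (60:Int) < age by omega),
                  decide_eq_false (show ¬(70:Int) < age by omega),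
                  decide_eq_false (show ¬(80:Int) < age by omega), decide_eq_false (show ¬(100:Int) < age by omega)]
                split_ifs <;> first | omega | decide
              · simp only [if_neg h5]
                by_cases h6 : 70 < age ∧ age ≤ 80
                · simp only [if_pos h6, List.countP, List.countP.go,
                    decide_eq_true (show (5:Int) < age by omega), decide_eq_true (show (10:Int) < age by omega),
                    decide_eq_true (show (20:Int) < age by omega), decide_eq_true (show (60:Int) < age by omega),
                    decide_eq_true (show (70:Int) < age by omega),
                    decide_eq_false (show ¬(80:Int) < age by omega), decide_eq_false (show ¬(100:Int) < age by omega)]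
                  split_ifs <;> first | omega | decide
                · simp only [if_neg h6]
                  have h7 : 80 < age ∧ age ≤ 100 := by omega
                  simp only [if_pos h7, List.countP, List.countP.go,
                    decide_eq_true (show (5:Int) < age by omega), decide_eq_true (show (10:Int) < age by omega),
                    decide_eq_true (show (20:Int) < age by omega), decide_eq_true (show (60:Int) < age by omega),
                    decide_eq_true (show (70:Int) < age by omega), decide_eq_true (show (80:Int) < age by omega),
                    decide_eq_false (show ¬(100:Int) < age by omega)]
                  split_ifs <;> first | omega | decide
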